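-- pv_equiv track=rewrite | github.com/limitz/glitchkin | output/tools/LTG_TOOL_grandma_miri_color_model.py | group_swatches
-- ===== SOURCE A (Python) =====
-- def group_swatches(swatches):
--     """Return list of (group_name, [swatch_entries]) in order of first appearance."""
--     groups = {}
--     order = []
--     for entry in swatches:
--         label, hex_str, rgb, group = entry
--         if group not in groups:
--             groups[group] = []
--             order.append(group)
--         groups[group].append((label, hex_str, rgb))
--     return [(g, groups[g]) for g in order]
-- ===== SOURCE B (Python) =====
-- def group_swatches(swatches):
--     """Return list of (group_name, [swatch_entries]) in order of first appearance."""
--     swatches = list(swatches)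
--     seen = set()
--     order = []
--     for label, hex_str, rgb, group in swatches:
--         if group not in seen:
--             seen.add(group)
--             order.append(group)
--     return [(g, [(label, hex_str, rgb)
--                  for label, hex_str, rgb, grp in swatches if grp == g])
--             for g in order]
-- ===== Notes on version B (the rewrite author's own statement) =====
-- stated objective: alternative
-- what changed: Replaces the single dict-accumulating pass (per-group append lists plus an order list) by two passes: collect distinct group labels in first-appearance order, then build each group's entries by filtering the materialized input.
import Mathlib
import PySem

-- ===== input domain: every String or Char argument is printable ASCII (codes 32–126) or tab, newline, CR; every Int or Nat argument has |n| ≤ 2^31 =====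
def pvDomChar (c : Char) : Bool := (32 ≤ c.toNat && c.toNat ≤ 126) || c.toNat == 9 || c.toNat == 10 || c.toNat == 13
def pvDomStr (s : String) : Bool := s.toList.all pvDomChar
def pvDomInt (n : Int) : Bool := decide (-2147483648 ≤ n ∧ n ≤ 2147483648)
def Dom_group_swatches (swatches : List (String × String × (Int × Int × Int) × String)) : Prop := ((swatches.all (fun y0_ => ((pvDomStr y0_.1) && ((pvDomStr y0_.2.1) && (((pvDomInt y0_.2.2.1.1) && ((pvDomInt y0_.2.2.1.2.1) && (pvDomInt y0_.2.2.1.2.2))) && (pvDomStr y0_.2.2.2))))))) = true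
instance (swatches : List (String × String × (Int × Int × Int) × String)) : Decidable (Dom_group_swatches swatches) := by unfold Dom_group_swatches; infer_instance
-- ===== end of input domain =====

-- B is an alternative two-pass decomposition (collect distinct groups, then filter per group);
-- equivalence of the return values is proved (neither implementation mutates its argument).

-- ===== PORT A =====
-- A's loop body: tuple unpack; if group unseen, create its empty list and record the order; append the entry
def gsStepA (st : PySem.Dict String (List (String × String × (Int × Int × Int))) × List String)
    (entry : String × String × (Int × Int × Int) × String) :
    PySem.Dict String (List (String × String × (Int × Int × Int))) × List String :=
  let label := entry.1
  let hex_str := entry.2.1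
  let rgb := entry.2.2.1
  let group := entry.2.2.2
  let st1 := if st.1.contains group then st else (st.1.insert group [], st.2 ++ [group])
  (st1.1.insert group (st1.1.getD group [] ++ [(label, hex_str, rgb)]), st1.2)

def group_swatches (swatches : List (String × String × (Int × Int × Int) × String)) : List (String × (List (String × String × (Int × Int × Int)))) :=
  let st := swatches.foldl gsStepA (PySem.Dict.empty, [])
  st.2.map (fun g => (g, st.1.getD g []))

-- ===== PORT B =====
-- pass 1: distinct group labels in first-appearance order (seen-set loop); pass 2: filter the input per label
def group_swatches_alt (swatches : List (String × String × (Int × Int × Int) × String)) : List (String × (List (String × String × (Int × Int × Int)))) :=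
  let order : PySem.Set String :=
    swatches.foldl (fun seen e => PySem.Set.add seen e.2.2.2) PySem.Set.empty
  order.map (fun g =>
    (g, (swatches.filter (fun e => e.2.2.2 == g)).map (fun e => (e.1, e.2.1, e.2.2.1))))

-- ===== PRECONDITION & SPEC =====
def Spec_group_swatches (swatches : List (String × String × (Int × Int × Int) × String)) (out : List (String × (List (String × String × (Int × Int × Int))))) : Prop := out = group_swatches_alt swatches
-- infer_instance hits the instance-search depth limit on this nested type, so the DecidableEq instance is given explicitly
instance (swatches : List (String × String × (Int × Int × Int) × String)) (out : List (String × (List (String × String × (Int × Int × Int))))) : Decidable (Spec_group_swatches swatches out) := by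
  unfold Spec_group_swatches
  exact @instDecidableEqList _ (@instDecidableEqProd _ _ _ (@instDecidableEqList _ (@instDecidableEqProd _ _ _ (@instDecidableEqProd _ _ _ (@instDecidableEqProd _ _ _ (@instDecidableEqProd _ _ _ _)))))) out _

-- ===== CLAIM (what is proved, stated in full; the proofs are below) =====
def Claim_equal_group_swatches : Prop := ∀ (swatches : List (String × String × (Int × Int × Int) × String)), Dom_group_swatches swatches → Spec_group_swatches swatches (group_swatches swatches)

-- ===== LEMMAS AND PROOFS =====

-- loop invariant for A's single pass, stated relative to B's seen-set pass
theorem gs_loop_inv (l : List (String × String × (Int × Int × Int) × String))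
    (d : PySem.Dict String (List (String × String × (Int × Int × Int)))) (order : List String)
    (hsync : ∀ g, d.contains g = order.contains g) :
    (l.foldl gsStepA (d, order)).2 = l.foldl (fun seen e => PySem.Set.add seen e.2.2.2) order
    ∧ ∀ g, (l.foldl gsStepA (d, order)).1.getD g []
      = d.getD g [] ++ (l.filter (fun e => e.2.2.2 == g)).map (fun e => (e.1, e.2.1, e.2.2.1)) := by
  induction l generalizing d order with
  | nil => exact ⟨rfl, fun g => by simp⟩
  | cons e tl ih =>
    simp only [List.foldl_cons, List.filter_cons]
    by_cases h : d.contains e.2.2.2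
    · have hstep : gsStepA (d, order) e
          = (d.insert e.2.2.2 (d.getD e.2.2.2 [] ++ [(e.1, e.2.1, e.2.2.1)]), order) := by
        simp [gsStepA, h]
      have hadd : PySem.Set.add order e.2.2.2 = order := by
        have hm : e.2.2.2 ∈ order := by
          have := (hsync e.2.2.2).symm.trans h
          simpa using this
        simp [PySem.Set.add, PySem.Set.contains, hm]
      have hsync' : ∀ g, (d.insert e.2.2.2 (d.getD e.2.2.2 [] ++ [(e.1, e.2.1, e.2.2.1)])).contains g
          = order.contains g := by
        intro g
        rw [PySem.Dict.contains_insert, ← hsync g]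
        by_cases hg : g = e.2.2.2
        · subst hg; simp [h]
        · simp [hg]
      obtain ⟨h1, h2⟩ := ih _ _ hsync'
      rw [hstep]
      refine ⟨by rw [h1, hadd], fun g => ?_⟩
      rw [h2 g, PySem.Dict.getD_insert]
      by_cases hg : g = e.2.2.2
      · simp [hg]
      · simp [hg, Ne.symm hg]
    · have hstep : gsStepA (d, order) e
          = (d.insert e.2.2.2 [(e.1, e.2.1, e.2.2.1)], order ++ [e.2.2.2]) := by
        simp only [gsStepA, h]
        rw [if_neg (by simp [h])]
        rw [PySem.Dict.getD_insert_self, PySem.Dict.insert_insert_self]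
        simp
      have hmem : e.2.2.2 ∉ order := by
        intro hm
        apply h
        rw [hsync]
        simp [hm]
      have hadd : PySem.Set.add order e.2.2.2 = order ++ [e.2.2.2] := by
        simp [PySem.Set.add, PySem.Set.contains, hmem]
      have hsync' : ∀ g, (d.insert e.2.2.2 [(e.1, e.2.1, e.2.2.1)]).contains g
          = (order ++ [e.2.2.2]).contains g := by
        intro g
        rw [PySem.Dict.contains_insert, hsync g]
        by_cases hg : g = e.2.2.2 <;> simp [hg, List.contains_append, Bool.or_comm]
      obtain ⟨h1, h2⟩ := ih _ _ hsync'
      rw [hstep]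
      refine ⟨by rw [h1, hadd], fun g => ?_⟩
      rw [h2 g, PySem.Dict.getD_insert]
      by_cases hg : g = e.2.2.2
      · subst hg
        have hd : d.getD e.2.2.2 [] = [] := by
          apply PySem.Dict.getD_of_not_contains
          simpa using h
        simp [hd]
      · simp [hg, Ne.symm hg]

-- ===== VERDICT (by name: the statement is the Claim_ definition above) =====
theorem group_swatches_spec : Claim_equal_group_swatches := by
  intro swatches _
  simp only [Spec_group_swatches, group_swatches, group_swatches_alt]
  obtain ⟨h1, h2⟩ := gs_loop_inv swatches PySem.Dict.empty []
    (fun g => by simp [PySem.Dict.contains_empty])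
  rw [h1]
  exact List.map_congr_left fun g _ => by rw [h2 g]; simp [PySem.Set.empty]
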